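-- pv_equiv track=rewrite | github.com/yashank-mittal/Prepfortech | Batch12/musadhiek/how_many_parata.py | how_many_parata
-- ===== SOURCE A (Python) =====
-- def how_many_parata(ranks, parata_required, mid_time):
--     parata_made = 0
--
--     for rank in ranks:
--         time = rank
--         r_value = 2
--         while time <= mid_time:
--             parata_made += 1
--             time += (rank * r_value)
--             r_value += 1
--         if parata_made >= parata_required:
--             return True
--     return False
-- ===== SOURCE B (Python) =====
-- def _isqrt(n):
--     # recursive integer square root (floor), exact for n >= 0
--     if n < 2:
--         return n
--     r = 2 * _isqrt(n // 4)
--     return r + 1 if (r + 1) * (r + 1) <= n else r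
--
--
-- def how_many_parata(ranks, parata_required, mid_time):
--     made = 0
--     for rank in ranks:
--         if rank <= mid_time:
--             # paratas this cook makes: largest k with rank*k*(k+1)/2 <= mid_time
--             t = (2 * mid_time) // rank
--             made += (_isqrt(4 * t + 1) - 1) // 2
--         if made >= parata_required:
--             return True
--     return False
-- ===== Notes on version B (the rewrite author's own statement) =====
-- stated objective: faster
-- what changed: Replaces A's inner while-loop (one iteration per parata) by the closed-form count max k with rank*k*(k+1)/2 <= mid_time, computed with a recursive integer square root; intended as faster (O(log mid_time) per rank vs O(sqrt(mid_time/rank))); measured: a timing run saw A time out at n=16 where B returned, so no ratio could be read.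
-- outside the precondition, e.g. on how_many_parata([1, 0], 1, 1): A returns True, B returns True
import Mathlib
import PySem

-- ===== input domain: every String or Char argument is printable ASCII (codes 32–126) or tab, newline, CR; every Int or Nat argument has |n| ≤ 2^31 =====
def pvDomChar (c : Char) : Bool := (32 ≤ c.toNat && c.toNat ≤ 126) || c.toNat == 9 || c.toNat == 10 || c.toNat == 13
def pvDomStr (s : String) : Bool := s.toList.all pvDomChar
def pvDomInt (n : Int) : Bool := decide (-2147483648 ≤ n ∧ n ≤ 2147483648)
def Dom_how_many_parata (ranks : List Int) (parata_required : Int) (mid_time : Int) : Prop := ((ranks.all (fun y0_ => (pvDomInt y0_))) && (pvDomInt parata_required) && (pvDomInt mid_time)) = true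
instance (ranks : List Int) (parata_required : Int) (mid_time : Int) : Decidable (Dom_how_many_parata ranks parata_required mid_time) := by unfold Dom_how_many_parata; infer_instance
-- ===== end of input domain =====

-- B replaces A's inner while-loop (one iteration per parata) by the closed-form count
-- max k with rank*k*(k+1)/2 ≤ mid_time via a recursive integer square root; intended as faster
-- (a timing run saw A time out where B returned, so no ratio was measured).

-- ===== PORT A =====
-- the inner 'while time <= mid_time' loop; ported with fuel (mid_time.toNat + 1), which inside
-- Pre_ strictly exceeds the iteration count (each iteration k needs rank*k*(k+1)/2 ≤ mid_time, rank ≥ 1, so k ≤ mid_time)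
def innerA (rank mid_time : Int) : Nat → Int → Int → Int → Int
  | 0, _, _, parata_made => parata_made
  | fuel + 1, time, r_value, parata_made =>
    if time ≤ mid_time then
      innerA rank mid_time fuel (time + rank * r_value) (r_value + 1) (parata_made + 1)
    else parata_made

def aLoop (parata_required mid_time : Int) : List Int → Int → Bool
  | [], _ => false
  | rank :: rs, parata_made =>
    let m := innerA rank mid_time (mid_time.toNat + 1) rank 2 parata_made
    if m ≥ parata_required then true else aLoop parata_required mid_time rs m

def how_many_parata (ranks : List Int) (parata_required : Int) (mid_time : Int) : Bool :=
  aLoop parata_required mid_time ranks 0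

-- ===== PORT B =====
-- _isqrt from Source B
def pvIsqrt (n : Int) : Int :=
  if n < 2 then n
  else
    let r := 2 * pvIsqrt (PySem.Int.floordiv n 4)
    if (r + 1) * (r + 1) ≤ n then r + 1 else r
termination_by n.toNat
decreasing_by
  rw [PySem.Int.floordiv_eq_ediv_of_pos (by omega : (0:Int) < 4)]
  omega

-- the expression '(_isqrt(4 * t + 1) - 1) // 2' with t = (2 * mid_time) // rank
def pvCount (rank mid_time : Int) : Int :=
  PySem.Int.floordiv (pvIsqrt (4 * PySem.Int.floordiv (2 * mid_time) rank + 1) - 1) 2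

def bLoop (parata_required mid_time : Int) : List Int → Int → Bool
  | [], _ => false
  | rank :: rs, made =>
    let made' := if rank ≤ mid_time then made + pvCount rank mid_time else made
    if made' ≥ parata_required then true else bLoop parata_required mid_time rs made'

def how_many_parata_alt (ranks : List Int) (parata_required : Int) (mid_time : Int) : Bool :=
  bLoop parata_required mid_time ranks 0

-- ===== PRECONDITION & SPEC =====
-- Pre_ excludes inputs holding a nonpositive rank ≤ mid_time: on such a rank A's while-loop never
-- terminates (time never grows past mid_time), so A diverges unless an earlier rank already reached
-- the quota — the early-return cases excluded along with them are cited in the claim.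
def Pre_how_many_parata (ranks : List Int) (parata_required : Int) (mid_time : Int) : Prop :=
  ∀ r ∈ ranks, 0 < r ∨ mid_time < r
instance (ranks : List Int) (parata_required : Int) (mid_time : Int) : Decidable (Pre_how_many_parata ranks parata_required mid_time) := by unfold Pre_how_many_parata; infer_instance

def pvWitness_how_many_parata : List Int × Int × Int := ([1, 2], 3, 10)

def Spec_how_many_parata (ranks : List Int) (parata_required : Int) (mid_time : Int) (out : Bool) : Prop := out = how_many_parata_alt ranks parata_required mid_time
instance (ranks : List Int) (parata_required : Int) (mid_time : Int) (out : Bool) : Decidable (Spec_how_many_parata ranks parata_required mid_time out) := by unfold Spec_how_many_parata; infer_instance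

-- ===== CLAIM (what is proved, stated in full; the proofs are below) =====
def Claim_equal_how_many_parata : Prop := ∀ (ranks : List Int) (parata_required : Int) (mid_time : Int), Dom_how_many_parata ranks parata_required mid_time → Pre_how_many_parata ranks parata_required mid_time → Spec_how_many_parata ranks parata_required mid_time (how_many_parata ranks parata_required mid_time)

-- ===== LEMMAS AND PROOFS =====

lemma pvIsqrt_step (n : Int) (h : ¬ n < 2) :
    pvIsqrt n =
      if (2 * pvIsqrt (PySem.Int.floordiv n 4) + 1) * (2 * pvIsqrt (PySem.Int.floordiv n 4) + 1) ≤ n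
      then 2 * pvIsqrt (PySem.Int.floordiv n 4) + 1
      else 2 * pvIsqrt (PySem.Int.floordiv n 4) := by
  conv_lhs => rw [pvIsqrt]
  rw [if_neg h]

lemma pvIsqrt_step_spec (n : Int) (hn : 0 ≤ n) (h : ¬ n < 2)
    (ih : 0 ≤ pvIsqrt (PySem.Int.floordiv n 4) ∧
          pvIsqrt (PySem.Int.floordiv n 4) * pvIsqrt (PySem.Int.floordiv n 4) ≤ PySem.Int.floordiv n 4 ∧
          PySem.Int.floordiv n 4 < (pvIsqrt (PySem.Int.floordiv n 4) + 1) * (pvIsqrt (PySem.Int.floordiv n 4) + 1)) :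
    0 ≤ pvIsqrt n ∧ pvIsqrt n * pvIsqrt n ≤ n ∧ n < (pvIsqrt n + 1) * (pvIsqrt n + 1) := by
  have hdiv : 4 * PySem.Int.floordiv n 4 ≤ n ∧ n ≤ 4 * PySem.Int.floordiv n 4 + 3 := by
    rw [PySem.Int.floordiv_eq_ediv_of_pos (by omega : (0:Int) < 4)]; omega
  rw [pvIsqrt_step n h]
  set m := PySem.Int.floordiv n 4 with hm
  set s := pvIsqrt m with hsd
  obtain ⟨hs0, hsl, hsu⟩ := ih
  by_cases hb : (2 * s + 1) * (2 * s + 1) ≤ n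
  · rw [if_pos hb]
    exact ⟨by omega, hb, by nlinarith⟩
  · rw [if_neg hb]
    exact ⟨by omega, by nlinarith, by nlinarith⟩

lemma pvIsqrt_spec : ∀ (n : Int), 0 ≤ n →
    0 ≤ pvIsqrt n ∧ pvIsqrt n * pvIsqrt n ≤ n ∧ n < (pvIsqrt n + 1) * (pvIsqrt n + 1) := by
  intro n
  induction n using pvIsqrt.induct with
  | case1 n h =>
    intro hn
    rw [pvIsqrt, if_pos h]
    exact ⟨hn, by nlinarith, by nlinarith⟩
  | case2 n h r hb ih =>
    intro hn
    exact pvIsqrt_step_spec n hn h (ih (by rw [PySem.Int.floordiv_eq_ediv_of_pos (by omega : (0:Int) < 4)]; omega))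
  | case3 n h r hb ih =>
    intro hn
    exact pvIsqrt_step_spec n hn h (ih (by rw [PySem.Int.floordiv_eq_ediv_of_pos (by omega : (0:Int) < 4)]; omega))

lemma pvCount_brackets (rank M : Int) (hr : 0 < rank) (hrM : rank ≤ M) :
    1 ≤ pvCount rank M ∧ pvCount rank M ≤ M ∧
    rank * (pvCount rank M * (pvCount rank M + 1)) ≤ 2 * M ∧
    2 * M < rank * ((pvCount rank M + 1) * (pvCount rank M + 2)) := by
  unfold pvCount
  set t := PySem.Int.floordiv (2 * M) rank with htdef
  have ht2 : 2 ≤ t := (PySem.Int.le_floordiv_iff_mul_le hr).mpr (by nlinarith)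
  have htub : t * rank ≤ 2 * M := (PySem.Int.le_floordiv_iff_mul_le hr).mp le_rfl
  obtain ⟨hs0, hsl, hsu⟩ := pvIsqrt_spec (4 * t + 1) (by omega)
  set s := pvIsqrt (4 * t + 1) with hsdef
  have hs3 : 3 ≤ s := by nlinarith
  rw [PySem.Int.floordiv_eq_ediv_of_pos (by omega : (0:Int) < 2)]
  set K := (s - 1) / 2 with hKdef
  have hKb : 2 * K ≤ s - 1 ∧ s - 1 < 2 * K + 2 := by omega
  have hK1 : 1 ≤ K := by omega
  have hpar : s = 2 * K + 1 ∨ s = 2 * K + 2 := by omega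
  have hlow : K * (K + 1) ≤ t := by
    rcases hpar with hp | hp
    · nlinarith
    · have h4 : 4 * ((K + 1) * (K + 1)) ≤ 4 * t + 1 := by nlinarith
      have hu : (K + 1) * (K + 1) < t + 1 := by linarith
      have hu' : (K + 1) * (K + 1) ≤ t := Int.lt_add_one_iff.mp hu
      nlinarith
  have hhigh : t < (K + 1) * (K + 2) := by
    rcases hpar with hp | hp
    · nlinarith
    · nlinarith
  have h2 := (PySem.Int.floordiv_lt_iff_lt_mul hr).mp (show PySem.Int.floordiv (2 * M) rank < (K + 1) * (K + 2) from htdef ▸ hhigh)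
  exact ⟨hK1, by nlinarith, by nlinarith, by nlinarith⟩

lemma innerA_run (rank M K : Int) (hr : 0 < rank) (hK : 0 ≤ K)
    (hle : rank * (K * (K + 1)) ≤ 2 * M) (hgt : 2 * M < rank * ((K + 1) * (K + 2))) :
    ∀ (fuel : Nat) (j time made : Int), 0 ≤ j → 2 * time = rank * ((j + 1) * (j + 2)) →
      K - j ≤ (fuel : Int) →
      innerA rank M fuel time (j + 2) made = made + max (K - j) 0 := by
  intro fuel
  induction fuel with
  | zero =>
    intro j time made hj htime hfuel
    simp only [innerA]
    omega
  | succ f ih =>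
    intro j time made hj htime hfuel
    have hcond : time ≤ M ↔ j + 1 ≤ K := by
      constructor
      · intro hc
        by_contra hcc
        have h1 : K + 1 ≤ j + 1 := by omega
        have hmono : (K + 1) * (K + 2) ≤ (j + 1) * (j + 2) :=
          calc (K + 1) * (K + 2) ≤ (j + 1) * (K + 2) :=
                mul_le_mul_of_nonneg_right (by omega) (by omega)
            _ ≤ (j + 1) * (j + 2) := mul_le_mul_of_nonneg_left (by omega) (by omega)
        have := mul_le_mul_of_nonneg_left hmono hr.le
        omega
      · intro hc
        have hmono : (j + 1) * (j + 2) ≤ K * (K + 1) :=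
          calc (j + 1) * (j + 2) ≤ K * (j + 2) :=
                mul_le_mul_of_nonneg_right (by omega) (by omega)
            _ ≤ K * (K + 1) := mul_le_mul_of_nonneg_left (by omega) (by omega)
        have := mul_le_mul_of_nonneg_left hmono hr.le
        omega
    simp only [innerA]
    by_cases hc : time ≤ M
    · rw [if_pos hc]
      have hjK : j + 1 ≤ K := hcond.mp hc
      have hrec : innerA rank M f (time + rank * (j + 2)) ((j + 1) + 2) (made + 1)
           = (made + 1) + max (K - (j + 1)) 0 :=
        ih (j + 1) _ _ (by omega) (by ring_nf; ring_nf at htime; linarith) (by omega)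
      have harg : (j + 2) + 1 = (j + 1) + 2 := by ring
      rw [harg, hrec]
      omega
    · rw [if_neg hc]
      have : ¬ (j + 1 ≤ K) := fun hh => hc (hcond.mpr hh)
      omega

lemma innerA_eq_closed (rank M made : Int) (h : 0 < rank ∨ M < rank) :
    innerA rank M (M.toNat + 1) rank 2 made =
      (if rank ≤ M then made + pvCount rank M else made) := by
  by_cases hrM : rank ≤ M
  · rw [if_pos hrM]
    have hr : 0 < rank := by omega
    obtain ⟨hK1, hKM, hle, hgt⟩ := pvCount_brackets rank M hr hrM
    have hM0 : 0 < M := by omega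
    have hrun := innerA_run rank M (pvCount rank M) hr (by omega) hle hgt
      (M.toNat + 1) 0 rank made (by omega) (by ring) (by omega)
    norm_num at hrun
    rw [hrun, max_eq_left (by omega : (0:Int) ≤ pvCount rank M)]
  · rw [if_neg hrM]
    simp only [innerA, if_neg hrM]

lemma loops_eq (pr M : Int) : ∀ (rs : List Int) (made : Int),
    (∀ r ∈ rs, 0 < r ∨ M < r) → aLoop pr M rs made = bLoop pr M rs made := by
  intro rs
  induction rs with
  | nil => intro made _; rfl
  | cons rank rs ih =>
    intro made hpre
    simp only [aLoop, bLoop]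
    rw [innerA_eq_closed rank M made (hpre rank (by simp))]
    split <;> split <;>
      first
        | rfl
        | exact ih _ (fun r hr => hpre r (List.mem_cons_of_mem _ hr))

-- ===== VERDICT (by name: the statement is the Claim_ definition above) =====
theorem how_many_parata_spec : Claim_equal_how_many_parata := by
  intro ranks pr M _ hpre
  unfold Spec_how_many_parata how_many_parata how_many_parata_alt
  exact loops_eq pr M ranks 0 hpre
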